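-- pv_equiv track=rewrite | github.com/Melodiz/CodeRun | Algorithms/Medium/53_run_manhattan/run_manhattan.py | solve
-- ===== SOURCE A (Python) =====
-- def solve(time_limit, distance_limit, navigator_data):
--     def expand_rectangle(rect, expansion):
--         max_sum, min_diff, min_sum, max_diff = rect
--         return [max_sum + expansion, min_diff + expansion, min_sum - expansion, max_diff - expansion]
--
--     def intersect_rectangles(rect1, rect2):
--         max_sum1, min_diff1, min_sum1, max_diff1 = rect1
--         max_sum2, min_diff2, min_sum2, max_diff2 = rect2
--         return [min(max_sum1, max_sum2), min(min_diff1, min_diff2),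
--                 max(min_sum1, min_sum2), max(max_diff1, max_diff2)]
--
--     current_rect = [0, 0, 0, 0]
--
--     for x, y in navigator_data:
--         current_rect = expand_rectangle(rect=current_rect, expansion=time_limit)
--         new_rect = expand_rectangle([x + y, x - y, x + y, x - y], distance_limit)
--         current_rect = intersect_rectangles(current_rect, new_rect)
--
--     max_sum, min_diff, min_sum, max_diff = current_rect
--
--     possible_positions = set()
--
--     sum_range_start, sum_range_end = min(min_sum, max_sum), max(min_sum, max_sum)
--     diff_range_start, diff_range_end = min(min_diff, max_diff), max(min_diff, max_diff)
--
--     for sum_xy in range(sum_range_start, sum_range_end + 1):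
--         for diff_xy in range(diff_range_start, diff_range_end + 1):
--             x = sum_xy + diff_xy
--             if x % 2 == 0:
--                 y = sum_xy - x // 2
--                 possible_positions.add((x // 2, y))
--
--     return possible_positions
-- ===== SOURCE B (Python) =====
-- def solve(time_limit, distance_limit, navigator_data):
--     n = len(navigator_data)
--     tl, dl = time_limit, distance_limit
--     max_sum = min([n * tl] + [x + y + dl + (n - 1 - i) * tl for i, (x, y) in enumerate(navigator_data)])
--     min_diff = min([n * tl] + [x - y + dl + (n - 1 - i) * tl for i, (x, y) in enumerate(navigator_data)])
--     min_sum = max([-n * tl] + [x + y - dl - (n - 1 - i) * tl for i, (x, y) in enumerate(navigator_data)])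
--     max_diff = max([-n * tl] + [x - y - dl - (n - 1 - i) * tl for i, (x, y) in enumerate(navigator_data)])
--     s_lo, s_hi = min(min_sum, max_sum), max(min_sum, max_sum)
--     d_lo, d_hi = min(min_diff, max_diff), max(min_diff, max_diff)
--     pts = [((s + d) // 2, (s - d) // 2)
--            for s in range(s_lo, s_hi + 1)
--            for d in range(d_lo + (s - d_lo) % 2, d_hi + 1, 2)]
--     return set(pts)
-- ===== Notes on version B (the rewrite author's own statement) =====
-- stated objective: alternative
-- what changed: B replaces A's per-point expand/intersect rectangle recurrence by four closed-form min/max scans over the enumerated points, and replaces A's parity-filtered full double scan over (sum, diff) by an inner range of step 2 starting at the first diff of matching parity, building the result list directly instead of testing x % 2 on every cell.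
import Mathlib
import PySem

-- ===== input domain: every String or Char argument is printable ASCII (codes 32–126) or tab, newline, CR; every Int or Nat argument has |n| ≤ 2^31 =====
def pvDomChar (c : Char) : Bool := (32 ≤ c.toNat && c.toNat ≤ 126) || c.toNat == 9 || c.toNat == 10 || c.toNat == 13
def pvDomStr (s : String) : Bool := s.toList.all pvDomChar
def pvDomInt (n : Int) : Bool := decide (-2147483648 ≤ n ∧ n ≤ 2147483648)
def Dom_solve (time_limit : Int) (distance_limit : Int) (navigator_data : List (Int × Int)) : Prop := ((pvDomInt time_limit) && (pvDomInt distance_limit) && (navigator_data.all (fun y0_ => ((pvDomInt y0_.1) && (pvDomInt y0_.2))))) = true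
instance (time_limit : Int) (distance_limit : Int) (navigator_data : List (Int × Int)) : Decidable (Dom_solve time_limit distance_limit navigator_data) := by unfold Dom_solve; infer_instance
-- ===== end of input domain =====

-- B replaces A's running expand/intersect rectangle recurrence by closed-form min/max scans over
-- the enumerated points, and replaces the parity-filtered double scan over (sum, diff) by a
-- step-2 inner range that enumerates only the valid diffs (objective: alternative decomposition).

-- ===== PORT A =====
def expandRectangle (rect : Int × Int × Int × Int) (expansion : Int) : Int × Int × Int × Int :=
  (rect.1 + expansion, rect.2.1 + expansion, rect.2.2.1 - expansion, rect.2.2.2 - expansion)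

def intersectRectangles (r1 r2 : Int × Int × Int × Int) : Int × Int × Int × Int :=
  (min r1.1 r2.1, min r1.2.1 r2.2.1, max r1.2.2.1 r2.2.2.1, max r1.2.2.2 r2.2.2.2)

def solve (time_limit : Int) (distance_limit : Int) (navigator_data : List (Int × Int)) : List (Int × Int) :=
  let finalRect := navigator_data.foldl (fun current_rect p =>
    let current_rect' := expandRectangle current_rect time_limit
    let new_rect := expandRectangle (p.1 + p.2, p.1 - p.2, p.1 + p.2, p.1 - p.2) distance_limit
    intersectRectangles current_rect' new_rect) (0, 0, 0, 0)
  let max_sum := finalRect.1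
  let min_diff := finalRect.2.1
  let min_sum := finalRect.2.2.1
  let max_diff := finalRect.2.2.2
  let sum_range_start := min min_sum max_sum
  let sum_range_end := max min_sum max_sum
  let diff_range_start := min min_diff max_diff
  let diff_range_end := max min_diff max_diff
  (PySem.List.pyRange sum_range_start (sum_range_end + 1) 1).foldl (fun acc sum_xy =>
    (PySem.List.pyRange diff_range_start (diff_range_end + 1) 1).foldl (fun acc diff_xy =>
      if PySem.Int.mod (sum_xy + diff_xy) 2 == 0 then
        PySem.Set.add acc (PySem.Int.floordiv (sum_xy + diff_xy) 2,
          sum_xy - PySem.Int.floordiv (sum_xy + diff_xy) 2)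
      else acc) acc) ([] : PySem.Set (Int × Int))

-- ===== PORT B =====
-- min([a] + xs) / max([a] + xs) in Source B is the running fold of min/max started at a
def solve_alt (time_limit : Int) (distance_limit : Int) (navigator_data : List (Int × Int)) : List (Int × Int) :=
  let n : Int := navigator_data.length
  let e := PySem.List.enumerate navigator_data
  let max_sum := (e.map (fun q => q.2.1 + q.2.2 + distance_limit + (n - 1 - q.1) * time_limit)).foldl min (n * time_limit)
  let min_diff := (e.map (fun q => q.2.1 - q.2.2 + distance_limit + (n - 1 - q.1) * time_limit)).foldl min (n * time_limit)
  let min_sum := (e.map (fun q => q.2.1 + q.2.2 - distance_limit - (n - 1 - q.1) * time_limit)).foldl max (-n * time_limit)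
  let max_diff := (e.map (fun q => q.2.1 - q.2.2 - distance_limit - (n - 1 - q.1) * time_limit)).foldl max (-n * time_limit)
  let s_lo := min min_sum max_sum
  let s_hi := max min_sum max_sum
  let d_lo := min min_diff max_diff
  let d_hi := max min_diff max_diff
  PySem.Set.ofList ((PySem.List.pyRange s_lo (s_hi + 1) 1).flatMap (fun s =>
    (PySem.List.pyRange (d_lo + PySem.Int.mod (s - d_lo) 2) (d_hi + 1) 2).map (fun d =>
      (PySem.Int.floordiv (s + d) 2, PySem.Int.floordiv (s - d) 2))))

-- ===== PRECONDITION & SPEC =====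
def Spec_solve (time_limit : Int) (distance_limit : Int) (navigator_data : List (Int × Int)) (out : List (Int × Int)) : Prop := out = solve_alt time_limit distance_limit navigator_data
instance (time_limit : Int) (distance_limit : Int) (navigator_data : List (Int × Int)) (out : List (Int × Int)) : Decidable (Spec_solve time_limit distance_limit navigator_data out) := by unfold Spec_solve; infer_instance

-- ===== CLAIM (what is proved, stated in full; the proofs are below) =====
def Claim_equal_solve : Prop := ∀ (time_limit : Int) (distance_limit : Int) (navigator_data : List (Int × Int)), Dom_solve time_limit distance_limit navigator_data → Spec_solve time_limit distance_limit navigator_data (solve time_limit distance_limit navigator_data)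

-- ===== LEMMAS AND PROOFS =====

-- running 'min(acc + tl, g p + c)' over a list equals a min over closed-form shifted values
theorem pv_foldl_min_shift (tl c : Int) (g : Int × Int → Int) :
    ∀ (l : List (Int × Int)) (k M : Int),
      l.foldl (fun acc p => min (acc + tl) (g p + c)) M
        = ((PySem.List.enumerate l k).map
            (fun q => g q.2 + c + ((l.length : Int) + k - 1 - q.1) * tl)).foldl min
            (M + (l.length : Int) * tl) := by
  intro l
  induction l with
  | nil => intro k M; simp [PySem.List.enumerate_nil]
  | cons p t ih =>
    intro k M
    rw [List.foldl_cons, ih (k + 1)]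
    rw [PySem.List.enumerate_cons, List.map_cons, List.foldl_cons]
    have hf : (fun q : Int × Int × Int => g q.2 + c + ((t.length : Int) + (k + 1) - 1 - q.1) * tl)
        = (fun q : Int × Int × Int => g q.2 + c + (((p :: t).length : Int) + k - 1 - q.1) * tl) := by
      funext q; simp only [List.length_cons]; push_cast; ring
    rw [hf]
    congr 1
    simp only [List.length_cons]
    rw [← min_add_add_right]
    push_cast
    congr 1 <;> ring
theorem pv_foldl_max_shift (tl c : Int) (g : Int × Int → Int) :
    ∀ (l : List (Int × Int)) (k M : Int),
      l.foldl (fun acc p => max (acc - tl) (g p + c)) M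
        = ((PySem.List.enumerate l k).map
            (fun q => g q.2 + c - ((l.length : Int) + k - 1 - q.1) * tl)).foldl max
            (M - (l.length : Int) * tl) := by
  intro l
  induction l with
  | nil => intro k M; simp [PySem.List.enumerate_nil]
  | cons p t ih =>
    intro k M
    rw [List.foldl_cons, ih (k + 1)]
    rw [PySem.List.enumerate_cons, List.map_cons, List.foldl_cons]
    have hf : (fun q : Int × Int × Int => g q.2 + c - ((t.length : Int) + (k + 1) - 1 - q.1) * tl)
        = (fun q : Int × Int × Int => g q.2 + c - (((p :: t).length : Int) + k - 1 - q.1) * tl) := by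
      funext q; simp only [List.length_cons]; push_cast; ring
    rw [hf]
    congr 1
    simp only [List.length_cons]
    rw [← max_sub_sub_right]
    congr 1 <;> push_cast <;> ring

-- phase 1: A's expand/intersect fold equals B's four closed-form scans
theorem pv_rect_eq (tl dl : Int) (nav : List (Int × Int)) :
    nav.foldl (fun current_rect p =>
        intersectRectangles (expandRectangle current_rect tl)
          (expandRectangle (p.1 + p.2, p.1 - p.2, p.1 + p.2, p.1 - p.2) dl)) (0, 0, 0, 0)
      = (((PySem.List.enumerate nav).map (fun q => q.2.1 + q.2.2 + dl + (((nav.length : Int)) - 1 - q.1) * tl)).foldl min ((nav.length : Int) * tl),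
         ((PySem.List.enumerate nav).map (fun q => q.2.1 - q.2.2 + dl + (((nav.length : Int)) - 1 - q.1) * tl)).foldl min ((nav.length : Int) * tl),
         ((PySem.List.enumerate nav).map (fun q => q.2.1 + q.2.2 - dl - (((nav.length : Int)) - 1 - q.1) * tl)).foldl max (-(nav.length : Int) * tl),
         ((PySem.List.enumerate nav).map (fun q => q.2.1 - q.2.2 - dl - (((nav.length : Int)) - 1 - q.1) * tl)).foldl max (-(nav.length : Int) * tl)) := by
  have hstep : (fun (current_rect : Int × Int × Int × Int) (p : Int × Int) =>
      intersectRectangles (expandRectangle current_rect tl)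
        (expandRectangle (p.1 + p.2, p.1 - p.2, p.1 + p.2, p.1 - p.2) dl))
      = (fun cur p => (min (cur.1 + tl) (p.1 + p.2 + dl),
          (min (cur.2.1 + tl) (p.1 - p.2 + dl),
           (max (cur.2.2.1 - tl) (p.1 + p.2 - dl),
            max (cur.2.2.2 - tl) (p.1 - p.2 - dl))))) := by
    funext cur p; simp [intersectRectangles, expandRectangle]
  rw [hstep]
  rw [PySem.List.foldl_prod_mk (f := fun acc (p : Int × Int) => min (acc + tl) (p.1 + p.2 + dl))
      (g := fun (acc : Int × Int × Int) (p : Int × Int) =>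
        (min (acc.1 + tl) (p.1 - p.2 + dl),
         (max (acc.2.1 - tl) (p.1 + p.2 - dl), max (acc.2.2 - tl) (p.1 - p.2 - dl))))]
  rw [PySem.List.foldl_prod_mk (f := fun acc (p : Int × Int) => min (acc + tl) (p.1 - p.2 + dl))
      (g := fun (acc : Int × Int) (p : Int × Int) =>
        (max (acc.1 - tl) (p.1 + p.2 - dl), max (acc.2 - tl) (p.1 - p.2 - dl)))]
  rw [PySem.List.foldl_prod_mk (f := fun acc (p : Int × Int) => max (acc - tl) (p.1 + p.2 - dl))
      (g := fun (acc : Int) (p : Int × Int) => max (acc - tl) (p.1 - p.2 - dl))]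
  have hA : (fun (acc : Int) (p : Int × Int) => max (acc - tl) (p.1 + p.2 - dl))
      = fun acc p => max (acc - tl) (p.1 + p.2 + (-dl)) := by
    funext acc p; rw [sub_eq_add_neg (p.1 + p.2) dl]
  have hB : (fun (acc : Int) (p : Int × Int) => max (acc - tl) (p.1 - p.2 - dl))
      = fun acc p => max (acc - tl) (p.1 - p.2 + (-dl)) := by
    funext acc p; rw [sub_eq_add_neg (p.1 - p.2) dl]
  rw [hA, hB]
  rw [pv_foldl_min_shift tl dl (fun p => p.1 + p.2) nav 0,
      pv_foldl_min_shift tl dl (fun p => p.1 - p.2) nav 0,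
      pv_foldl_max_shift tl (-dl) (fun p => p.1 + p.2) nav 0,
      pv_foldl_max_shift tl (-dl) (fun p => p.1 - p.2) nav 0]
  refine congrArg₂ Prod.mk ?_ (congrArg₂ Prod.mk ?_ (congrArg₂ Prod.mk ?_ ?_))
  all_goals (congr 1; ring)

theorem pv_eq_of_pairwise_lt : ∀ {l1 l2 : List Int},
    l1.Pairwise (· < ·) → l2.Pairwise (· < ·) → (∀ x, x ∈ l1 ↔ x ∈ l2) → l1 = l2 := by
  intro l1 l2 h1 h2 hm
  exact List.Perm.eq_of_pairwise
    (fun a b _ _ hab hba => absurd hba (by omega)) h1 h2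
    ((List.perm_ext_iff_of_nodup (h1.imp Int.ne_of_lt) (h2.imp Int.ne_of_lt)).mpr hm)

theorem pv_filter_parity_eq (s a b : Int) :
    (PySem.List.pyRange a b 1).filter (fun d => PySem.Int.mod (s + d) 2 == 0)
      = PySem.List.pyRange (a + PySem.Int.mod (s - a) 2) b 2 := by
  refine pv_eq_of_pairwise_lt ((PySem.List.pairwise_lt_pyRange_one (a := a) (b := b)).filter _) ?_ ?_
  · rw [PySem.List.pyRange_of_pos (a := a + PySem.Int.mod (s - a) 2) (b := b) (by norm_num)]
    refine List.pairwise_map.mpr ?_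
    refine List.pairwise_lt_range.imp ?_
    intro i j hij
    omega
  · intro x
    simp only [List.mem_filter, PySem.List.mem_pyRange_one,
      PySem.List.mem_pyRange_iff_of_pos (by norm_num : (0:Int) < 2),
      PySem.Int.mod_eq_emod_of_pos (by norm_num : (0:Int) < 2), beq_iff_eq]
    omega

theorem pv_foldl_foldl_eq_flatMap {α β δ : Type} (f : δ → β → δ) (h : α → List β)
    (l : List α) (init : δ) :
    l.foldl (fun acc s => (h s).foldl f acc) init = (l.flatMap h).foldl f init := by
  induction l generalizing init with
  | nil => simp
  | cons x t ih => simp [List.flatMap_cons, List.foldl_append, ih]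

theorem pv_phase2 (s0 s1 d0 d1 : Int) :
    (PySem.List.pyRange s0 s1 1).foldl (fun acc sum_xy =>
        (PySem.List.pyRange d0 d1 1).foldl (fun acc diff_xy =>
          if PySem.Int.mod (sum_xy + diff_xy) 2 == 0 then
            PySem.Set.add acc (PySem.Int.floordiv (sum_xy + diff_xy) 2,
              sum_xy - PySem.Int.floordiv (sum_xy + diff_xy) 2)
          else acc) acc) ([] : PySem.Set (Int × Int))
      = PySem.Set.ofList ((PySem.List.pyRange s0 s1 1).flatMap (fun s =>
          (PySem.List.pyRange (d0 + PySem.Int.mod (s - d0) 2) d1 2).map (fun d =>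
            (PySem.Int.floordiv (s + d) 2, PySem.Int.floordiv (s - d) 2)))) := by
  rw [PySem.Set.ofList_eq_foldl, ← pv_foldl_foldl_eq_flatMap]
  apply PySem.List.foldl_congr_mem
  intro acc s _
  rw [List.foldl_map]
  rw [PySem.List.foldl_if_eq_foldl_filter (fun d => PySem.Int.mod (s + d) 2 == 0)
      (fun acc d => PySem.Set.add acc (PySem.Int.floordiv (s + d) 2,
        s - PySem.Int.floordiv (s + d) 2))]
  rw [pv_filter_parity_eq]
  apply PySem.List.foldl_congr_mem
  intro acc' d hd
  have hpar : (2:Int) ∣ (s + d) := by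
    rcases (PySem.List.mem_pyRange_iff_of_pos (by norm_num : (0:Int) < 2) d).mp hd with ⟨h1, h2, h3⟩
    have := PySem.Int.mod_eq_emod_of_pos (by norm_num : (0:Int) < 2) (a := s - d0)
    omega
  have h2 : s - PySem.Int.floordiv (s + d) 2 = PySem.Int.floordiv (s - d) 2 := by
    rw [PySem.Int.floordiv_eq_ediv_of_pos (by norm_num), PySem.Int.floordiv_eq_ediv_of_pos (by norm_num)]
    omega
  rw [h2]

-- ===== VERDICT (by name: the statement is the Claim_ definition above) =====
theorem solve_spec : Claim_equal_solve := by
  intro tl dl nav _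
  unfold Spec_solve
  show solve tl dl nav = solve_alt tl dl nav
  simp only [solve, solve_alt]
  rw [pv_rect_eq]
  exact pv_phase2 _ _ _ _
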